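-- pv_equiv track=rewrite | github.com/pypi-data/pypi-mirror-373 | packages/nichi/nichi-2.0.6.tar.gz/nichi-2.0.6/src/nichi/core/converter.py | generate_srt_content
-- ===== SOURCE A (Python) =====
-- from typing import List, Optional, Tuple
--
-- def generate_srt_content(cues: List[Tuple[str, str, str]]) -> str:
--     """
--     Generate SRT format content from cues.
--
--     Args:
--         cues: List of tuples containing (start_time, end_time, text)
--
--     Returns:
--         Complete SRT formatted content string
--     """
--     srt_lines = []
--     cue_index = 1
--
--     for start_time, end_time, subtitle_text in cues:
--         index_line = str(cue_index)
--         srt_lines.append(index_line)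
--
--         time_line = "%s --> %s" % (start_time, end_time)
--         srt_lines.append(time_line)
--
--         if subtitle_text:
--             srt_lines.append(subtitle_text)
--
--         srt_lines.append("")
--         cue_index += 1
--
--     joined_lines = "\n".join(srt_lines)
--     stripped_lines = joined_lines.rstrip()
--     result = "%s\n" % stripped_lines
--     return result
-- ===== SOURCE B (Python) =====
-- def generate_srt_content(cues):
--     """
--     Generate SRT format content from cues.
--
--     Builds the output string back-to-front: walks the cues in reverse,
--     prepending each cue's fully formatted block (index, time line,
--     optional text, blank separator) to the result, with no intermediate
--     line list or join.
--     """
--     out = ""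
--     i = len(cues)
--     for start_time, end_time, subtitle_text in reversed(cues):
--         block = str(i) + "\n" + start_time + " --> " + end_time + "\n"
--         if subtitle_text:
--             block += subtitle_text + "\n"
--         out = block + "\n" + out
--         i -= 1
--     return out.rstrip() + "\n"
-- ===== Notes on version B (the rewrite author's own statement) =====
-- stated objective: alternative
-- what changed: Builds the output back-to-front by iterating the cues in reverse and prepending each cue's complete formatted block directly onto the result string, instead of A's forward pass that accumulates a flat line list with blank-line sentinels and joins it; B has no line list and no join.
import Mathlib
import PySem

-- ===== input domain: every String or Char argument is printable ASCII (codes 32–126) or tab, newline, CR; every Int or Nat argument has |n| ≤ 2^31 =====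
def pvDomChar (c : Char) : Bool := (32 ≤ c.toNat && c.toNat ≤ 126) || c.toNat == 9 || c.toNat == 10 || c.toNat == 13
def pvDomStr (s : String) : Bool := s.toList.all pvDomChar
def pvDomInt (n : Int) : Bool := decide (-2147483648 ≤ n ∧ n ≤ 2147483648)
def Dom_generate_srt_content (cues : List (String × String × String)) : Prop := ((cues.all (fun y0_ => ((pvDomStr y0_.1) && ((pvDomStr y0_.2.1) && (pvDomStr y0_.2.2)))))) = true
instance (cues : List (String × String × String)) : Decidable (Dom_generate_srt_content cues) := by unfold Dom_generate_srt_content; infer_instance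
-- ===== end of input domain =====

-- B builds the output back-to-front: it walks the cues in reverse, prepending each cue's
-- complete formatted block to the result string, with no intermediate line list and no join
-- (alternative decomposition, not claimed faster).


-- ===== PORT A =====
def generate_srt_content (cues : List (String × String × String)) : String :=
  let st := cues.foldl (fun (acc : List String × Int) c =>
    let srt_lines := acc.1
    let cue_index := acc.2
    let index_line := PySem.Int.toStr cue_index
    let srt_lines := srt_lines ++ [index_line]
    let time_line := c.1 ++ " --> " ++ c.2.1
    let srt_lines := srt_lines ++ [time_line]
    let srt_lines := if c.2.2 ≠ "" then srt_lines ++ [c.2.2] else srt_lines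
    (srt_lines ++ [""], cue_index + 1)) ([], 1)
  let joined_lines := PySem.Str.join "\n" st.1
  let stripped_lines := PySem.Str.rstrip joined_lines
  stripped_lines ++ "\n"

-- ===== PORT B =====
def generate_srt_content_alt (cues : List (String × String × String)) : String :=
  let st := cues.reverse.foldl (fun (acc : String × Int) c =>
    let block := PySem.Int.toStr acc.2 ++ "\n" ++ c.1 ++ " --> " ++ c.2.1 ++ "\n"
    let block := if c.2.2 ≠ "" then block ++ c.2.2 ++ "\n" else block
    (block ++ "\n" ++ acc.1, acc.2 - 1)) ("", (cues.length : Int))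
  PySem.Str.rstrip st.1 ++ "\n"

-- ===== PRECONDITION & SPEC =====
def Spec_generate_srt_content (cues : List (String × String × String)) (out : String) : Prop := out = generate_srt_content_alt cues
instance (cues : List (String × String × String)) (out : String) : Decidable (Spec_generate_srt_content cues out) := by unfold Spec_generate_srt_content; infer_instance

-- ===== CLAIM (what is proved, stated in full; the proofs are below) =====
def Claim_equal_generate_srt_content : Prop := ∀ (cues : List (String × String × String)), Dom_generate_srt_content cues → Spec_generate_srt_content cues (generate_srt_content cues)

-- ===== LEMMAS AND PROOFS =====

-- per-cue lines on the List-Char side (without A's trailing "" sentinel)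
def pvParts (i : Int) (c : String × String × String) : List (List Char) :=
  [(PySem.Int.toStr i).toList, (c.1 ++ " --> " ++ c.2.1).toList] ++
    (if c.2.2 ≠ "" then [c.2.2.toList] else [])

-- A's foldl accumulates exactly the flat list of per-cue lines (+ sentinel)
lemma pvFoldA (cues : List (String × String × String)) (ls : List String) (i : Int) :
    cues.foldl (fun (acc : List String × Int) c =>
      let srt_lines := acc.1
      let cue_index := acc.2
      let index_line := PySem.Int.toStr cue_index
      let srt_lines := srt_lines ++ [index_line]
      let time_line := c.1 ++ " --> " ++ c.2.1
      let srt_lines := srt_lines ++ [time_line]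
      let srt_lines := if c.2.2 ≠ "" then srt_lines ++ [c.2.2] else srt_lines
      (srt_lines ++ [""], cue_index + 1)) (ls, i)
    = (ls ++ (PySem.List.enumerate cues i).flatMap
        (fun p => (pvParts p.1 p.2).map String.ofList ++ [""]), i + cues.length) := by
  induction cues generalizing ls i with
  | nil => simp [PySem.List.enumerate_nil]
  | cons c rest ih =>
    rw [List.foldl_cons, ih]
    simp only [PySem.List.enumerate_cons, List.flatMap_cons, pvParts]
    refine Prod.ext ?_ ?_
    · simp only []
      split_ifs with h <;>
        simp only [List.map_cons, List.map_nil, List.append_nil, List.cons_append,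
          List.nil_append, String.ofList_toList] <;>
        simp [List.append_assoc]
    · simp only [List.length_cons]
      push_cast; ring

-- B's foldl over the reversed cues prepends exactly the forward blocks
lemma pvFoldB (m : List (String × String × String)) (out : List Char) (i : Int) :
    m.foldl (fun (acc : String × Int) c =>
      let block := PySem.Int.toStr acc.2 ++ "\n" ++ c.1 ++ " --> " ++ c.2.1 ++ "\n"
      let block := if c.2.2 ≠ "" then block ++ c.2.2 ++ "\n" else block
      (block ++ "\n" ++ acc.1, acc.2 - 1)) (String.ofList out, i)
    = (String.ofList ((PySem.List.enumerate m.reverse (i - m.length + 1)).flatMap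
        (fun p => (pvParts p.1 p.2 ++ [[]]).flatMap (fun l => l ++ ['\n'])) ++ out),
       i - m.length) := by
  induction m generalizing out i with
  | nil => simp [PySem.List.enumerate_nil]
  | cons c rest ih =>
    rw [List.foldl_cons]
    have hstep : (let block := PySem.Int.toStr i ++ "\n" ++ c.1 ++ " --> " ++ c.2.1 ++ "\n"
        let block := if c.2.2 ≠ "" then block ++ c.2.2 ++ "\n" else block
        ((block ++ "\n" ++ String.ofList out : String), i - 1))
        = (String.ofList (((pvParts i c ++ [[]]).flatMap (fun l => l ++ ['\n'])) ++ out), i - 1) := by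
      refine Prod.ext ?_ rfl
      simp only [pvParts]
      apply String.toList_injective
      split_ifs with h <;> simp [List.append_assoc]
    rw [hstep, ih]
    refine Prod.ext ?_ ?_
    · apply congrArg String.ofList
      rw [List.reverse_cons, PySem.List.enumerate_append, List.flatMap_append, List.append_assoc]
      have e1 : i - ((c :: rest).length : Int) + 1 = i - 1 - (rest.length : Int) + 1 := by
        simp only [List.length_cons]; push_cast; ring
      have e2 : i - 1 - (rest.length : Int) + 1 + (rest.reverse.length : Int) = i := by
        simp only [List.length_reverse]; ring
      rw [e1, e2]
      simp [PySem.List.enumerate_cons, PySem.List.enumerate_nil, List.flatMap_append,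
        List.append_assoc]
    · simp only [List.length_cons]; push_cast; ring

-- flat per-line join plus one trailing newline = concatenation of line ++ "\n"
lemma pvJoinFlat (L : List (List Char)) :
    L.flatMap (fun l => l ++ ['\n'])
      = if L = [] then [] else PySem.Chars.join ['\n'] L ++ ['\n'] := by
  induction L with
  | nil => rfl
  | cons a L' ih =>
    cases L' with
    | nil => simp [PySem.Chars.join_singleton]
    | cons b L'' =>
      rw [List.flatMap_cons, ih]
      simp [PySem.Chars.join_cons_cons, List.append_assoc]

lemma pvRstrip_newline (cs : List Char) :
    PySem.Chars.rstrip (cs ++ ['\n']) = PySem.Chars.rstrip cs := by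
  simp [PySem.Chars.rstrip, List.reverse_append,
    show PySem.Chars.isspace '\n' = true from rfl]

-- ===== VERDICT (by name: the statement is the Claim_ definition above) =====
theorem generate_srt_content_spec : Claim_equal_generate_srt_content := by
  intro cues _
  unfold Spec_generate_srt_content generate_srt_content generate_srt_content_alt
  apply String.toList_injective
  have hB := pvFoldB cues.reverse [] (cues.length : Int)
  rw [show ("" : String) = String.ofList [] from rfl, hB]
  simp only [List.reverse_reverse, List.length_reverse, List.append_nil] at *
  rw [pvFoldA cues [] 1]
  simp only [List.nil_append, String.toList_append, PySem.Str.toList_rstrip,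
    PySem.Str.toList_join, String.toList_ofList]
  congr 1
  have h1 : ((PySem.List.enumerate cues 1).flatMap
        (fun p => (pvParts p.1 p.2).map String.ofList ++ [""])).map String.toList
      = (PySem.List.enumerate cues 1).flatMap (fun p => pvParts p.1 p.2 ++ [[]]) := by
    simp [List.map_flatMap, Function.comp_def, List.map_map, String.toList_ofList]
  have h2 : (PySem.List.enumerate cues ((cues.length : Int) - (cues.length : Int) + 1)).flatMap
        (fun p => (pvParts p.1 p.2 ++ [[]]).flatMap (fun l => l ++ ['\n']))
      = ((PySem.List.enumerate cues 1).flatMap (fun p => pvParts p.1 p.2 ++ [[]])).flatMap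
          (fun l => l ++ ['\n']) := by
    rw [show (cues.length : Int) - (cues.length : Int) + 1 = 1 by ring, List.flatMap_assoc]
  rw [h1, h2, pvJoinFlat, show ("\n" : String).toList = ['\n'] from rfl]
  set L := (PySem.List.enumerate cues 1).flatMap (fun p => pvParts p.1 p.2 ++ [[]]) with hL
  by_cases hnil : L = []
  · rw [hnil]; rfl
  · rw [if_neg hnil, pvRstrip_newline]
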